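-- pv_equiv track=rewrite | github.com/pierrealexandreguillemin-a11y/pocket_arbiter | scripts/pipeline/enrichment.py | apply_chapter_override
-- ===== SOURCE A (Python) =====
-- CHAPTER_OVERRIDES: dict[tuple[int, int], str] = {
--     (56, 57): "Annexe A - Cadence Rapide",
--     (58, 66): "Annexe B - Cadence Blitz",
--     (182, 186): "Classement Elo Standard FIDE",
--     (187, 191): "Classement Rapide et Blitz FIDE",
--     (192, 205): "Titres FIDE",
-- }
--
-- _OVERRIDE_SOURCE = "LA-octobre2025.pdf"
--
-- def apply_chapter_override(
--     source: str,
--     page: int | None,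
--     current_title: str,
-- ) -> str:
--     """Override CCH title for specific LA page ranges.
--
--     Args:
--         source: PDF filename.
--         page: Page number (or None).
--         current_title: Current CCH title from chunker.
--
--     Returns:
--         Overridden title if page matches, otherwise current_title unchanged.
--     """
--     if source != _OVERRIDE_SOURCE or page is None:
--         return current_title
--     for (start, end), title in CHAPTER_OVERRIDES.items():
--         if start <= page <= end:
--             return title
--     return current_title
-- ===== SOURCE B (Python) =====
-- CHAPTER_OVERRIDES: dict[tuple[int, int], str] = {
--     (56, 57): "Annexe A - Cadence Rapide",
--     (58, 66): "Annexe B - Cadence Blitz",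
--     (182, 186): "Classement Elo Standard FIDE",
--     (187, 191): "Classement Rapide et Blitz FIDE",
--     (192, 205): "Titres FIDE",
-- }
--
-- _OVERRIDE_SOURCE = "LA-octobre2025.pdf"
--
-- # Flattened page -> title table built once at import time: interval scanning
-- # is replaced by a single dictionary lookup.
-- _PAGE_INDEX = {p: t for (s, e), t in CHAPTER_OVERRIDES.items() for p in range(s, e + 1)}
--
--
-- def apply_chapter_override(source, page, current_title):
--     if source != _OVERRIDE_SOURCE or page is None:
--         return current_title
--     return _PAGE_INDEX.get(page, current_title)
-- ===== Notes on version B (the rewrite author's own statement) =====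
-- stated objective: alternative
-- what changed: Replaces the per-call scan over interval keys with a flattened page-to-title dictionary built once at module load, so each call is a single hash lookup instead of a loop over ranges.
import Mathlib
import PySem

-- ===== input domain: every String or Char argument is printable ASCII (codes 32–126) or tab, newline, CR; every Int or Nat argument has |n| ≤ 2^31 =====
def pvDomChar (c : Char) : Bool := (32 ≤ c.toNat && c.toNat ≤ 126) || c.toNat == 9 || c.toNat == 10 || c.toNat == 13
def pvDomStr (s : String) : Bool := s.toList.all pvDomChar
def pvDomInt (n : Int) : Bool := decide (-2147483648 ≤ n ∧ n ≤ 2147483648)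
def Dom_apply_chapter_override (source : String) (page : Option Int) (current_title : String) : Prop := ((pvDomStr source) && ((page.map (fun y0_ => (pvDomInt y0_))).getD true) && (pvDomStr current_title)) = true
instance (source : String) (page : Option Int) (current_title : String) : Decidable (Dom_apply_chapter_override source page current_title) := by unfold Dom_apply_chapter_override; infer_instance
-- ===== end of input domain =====

-- B replaces A's per-call scan over interval keys by a page→title table built once; same return value everywhere.

-- ===== PORT A =====
-- the CHAPTER_OVERRIDES dict (insertion order)
def chapterOverrides : List ((Int × Int) × String) :=
  [((56, 57), "Annexe A - Cadence Rapide"),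
   ((58, 66), "Annexe B - Cadence Blitz"),
   ((182, 186), "Classement Elo Standard FIDE"),
   ((187, 191), "Classement Rapide et Blitz FIDE"),
   ((192, 205), "Titres FIDE")]

-- the for-loop over CHAPTER_OVERRIDES.items() with early return
def findOverride : List ((Int × Int) × String) → Int → String → String
  | [], _, ct => ct
  | ((s, e), t) :: rest, p, ct => if s ≤ p ∧ p ≤ e then t else findOverride rest p ct

def apply_chapter_override (source : String) (page : Option Int) (current_title : String) : String :=
  if source ≠ "LA-octobre2025.pdf" ∨ page = none then current_title
  else
    match page with
    | none => current_title
    | some p => findOverride chapterOverrides p current_title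

-- ===== PORT B =====
-- _PAGE_INDEX = {p: t for (s, e), t in CHAPTER_OVERRIDES.items() for p in range(s, e + 1)}
def pageIndex : PySem.Dict Int String :=
  (chapterOverrides.flatMap
      (fun x => (PySem.List.pyRange x.1.1 (x.1.2 + 1) 1).map (fun p => (p, x.2)))).foldl
    (fun d pt => d.insert pt.1 pt.2) PySem.Dict.empty

def apply_chapter_override_alt (source : String) (page : Option Int) (current_title : String) : String :=
  if source ≠ "LA-octobre2025.pdf" ∨ page = none then current_title
  else
    match page with
    | none => current_title
    | some p => pageIndex.getD p current_title

-- ===== PRECONDITION & SPEC =====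
def Spec_apply_chapter_override (source : String) (page : Option Int) (current_title : String) (out : String) : Prop := out = apply_chapter_override_alt source page current_title
instance (source : String) (page : Option Int) (current_title : String) (out : String) : Decidable (Spec_apply_chapter_override source page current_title out) := by unfold Spec_apply_chapter_override; infer_instance

-- ===== CLAIM (what is proved, stated in full; the proofs are below) =====
def Claim_equal_apply_chapter_override : Prop := ∀ (source : String) (page : Option Int) (current_title : String), Dom_apply_chapter_override source page current_title → Spec_apply_chapter_override source page current_title (apply_chapter_override source page current_title)

-- ===== LEMMAS AND PROOFS =====
-- the flattened table, written out
set_option maxHeartbeats 1000000 in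
theorem pageIndex_eq : pageIndex = PySem.Dict.mk
    [((56 : Int), "Annexe A - Cadence Rapide"), ((57 : Int), "Annexe A - Cadence Rapide"), ((58 : Int), "Annexe B - Cadence Blitz"), ((59 : Int), "Annexe B - Cadence Blitz"), ((60 : Int), "Annexe B - Cadence Blitz"), ((61 : Int), "Annexe B - Cadence Blitz"), ((62 : Int), "Annexe B - Cadence Blitz"), ((63 : Int), "Annexe B - Cadence Blitz"), ((64 : Int), "Annexe B - Cadence Blitz"), ((65 : Int), "Annexe B - Cadence Blitz"), ((66 : Int), "Annexe B - Cadence Blitz"), ((182 : Int), "Classement Elo Standard FIDE"), ((183 : Int), "Classement Elo Standard FIDE"), ((184 : Int), "Classement Elo Standard FIDE"), ((185 : Int), "Classement Elo Standard FIDE"), ((186 : Int), "Classement Elo Standard FIDE"), ((187 : Int), "Classement Rapide et Blitz FIDE"), ((188 : Int), "Classement Rapide et Blitz FIDE"), ((189 : Int), "Classement Rapide et Blitz FIDE"), ((190 : Int), "Classement Rapide et Blitz FIDE"), ((191 : Int), "Classement Rapide et Blitz FIDE"), ((192 : Int), "Titres FIDE"), ((193 : Int), "Titres FIDE"), ((194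 : Int), "Titres FIDE"), ((195 : Int), "Titres FIDE"), ((196 : Int), "Titres FIDE"), ((197 : Int), "Titres FIDE"), ((198 : Int), "Titres FIDE"), ((199 : Int), "Titres FIDE"), ((200 : Int), "Titres FIDE"), ((201 : Int), "Titres FIDE"), ((202 : Int), "Titres FIDE"), ((203 : Int), "Titres FIDE"), ((204 : Int), "Titres FIDE"), ((205 : Int), "Titres FIDE")] := by
  rfl

theorem findOverride_eq_getD (p : Int) (ct : String) :
    findOverride chapterOverrides p ct = pageIndex.getD p ct := by
  rw [pageIndex_eq]
  by_cases h1 : 56 ≤ p ∧ p ≤ 66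
  · obtain ⟨ha, hb⟩ := h1; interval_cases p <;> rfl
  by_cases h2 : 182 ≤ p ∧ p ≤ 205
  · obtain ⟨ha, hb⟩ := h2; interval_cases p <;> rfl
  simp only [chapterOverrides, findOverride, PySem.Dict.getD, PySem.Dict.get?_mk_cons, beq_iff_eq]
  rw [if_neg (by omega : ¬(((56:Int) ≤ p ∧ p ≤ (57:Int)))),
    if_neg (by omega : ¬(((58:Int) ≤ p ∧ p ≤ (66:Int)))),
    if_neg (by omega : ¬(((182:Int) ≤ p ∧ p ≤ (186:Int)))),
    if_neg (by omega : ¬(((187:Int) ≤ p ∧ p ≤ (191:Int)))),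
    if_neg (by omega : ¬(((192:Int) ≤ p ∧ p ≤ (205:Int)))),
    if_neg (by omega : ¬((56:Int) = p)),
    if_neg (by omega : ¬((57:Int) = p)),
    if_neg (by omega : ¬((58:Int) = p)),
    if_neg (by omega : ¬((59:Int) = p)),
    if_neg (by omega : ¬((60:Int) = p)),
    if_neg (by omega : ¬((61:Int) = p)),
    if_neg (by omega : ¬((62:Int) = p)),
    if_neg (by omega : ¬((63:Int) = p)),
    if_neg (by omega : ¬((64:Int) = p)),
    if_neg (by omega : ¬((65:Int) = p)),
    if_neg (by omega : ¬((66:Int) = p)),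
    if_neg (by omega : ¬((182:Int) = p)),
    if_neg (by omega : ¬((183:Int) = p)),
    if_neg (by omega : ¬((184:Int) = p)),
    if_neg (by omega : ¬((185:Int) = p)),
    if_neg (by omega : ¬((186:Int) = p)),
    if_neg (by omega : ¬((187:Int) = p)),
    if_neg (by omega : ¬((188:Int) = p)),
    if_neg (by omega : ¬((189:Int) = p)),
    if_neg (by omega : ¬((190:Int) = p)),
    if_neg (by omega : ¬((191:Int) = p)),
    if_neg (by omega : ¬((192:Int) = p)),
    if_neg (by omega : ¬((193:Int) = p)),
    if_neg (by omega : ¬((194:Int) = p)),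
    if_neg (by omega : ¬((195:Int) = p)),
    if_neg (by omega : ¬((196:Int) = p)),
    if_neg (by omega : ¬((197:Int) = p)),
    if_neg (by omega : ¬((198:Int) = p)),
    if_neg (by omega : ¬((199:Int) = p)),
    if_neg (by omega : ¬((200:Int) = p)),
    if_neg (by omega : ¬((201:Int) = p)),
    if_neg (by omega : ¬((202:Int) = p)),
    if_neg (by omega : ¬((203:Int) = p)),
    if_neg (by omega : ¬((204:Int) = p)),
    if_neg (by omega : ¬((205:Int) = p))]
  rfl

-- ===== VERDICT (by name: the statement is the Claim_ definition above) =====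
theorem apply_chapter_override_spec : Claim_equal_apply_chapter_override := by
  intro source page current_title _
  unfold Spec_apply_chapter_override apply_chapter_override apply_chapter_override_alt
  split_ifs with h
  · rfl
  · cases page with
    | none => rfl
    | some p => exact findOverride_eq_getD p current_title
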